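-- pv_equiv track=rewrite | github.com/mattwedge/AdventOfCode | 2021/day19/solution.py | check_for_1d_overlap
-- ===== SOURCE A (Python) =====
-- from collections import defaultdict, Counter
--
-- def check_for_1d_overlap(pts_1, pts_2):
--     """A quick check to optimise rejecting pairs where no dimension
--         could possibly match the x-axis of the first scanner.
--     """
--     for flip in [1, -1]:
--         pts_2_oriented = [pt * flip for pt in pts_2]
--
--         for pt_1 in pts_1:
--             for pt_2 in pts_2_oriented:
--                 pts_1_shifted = [pt - pt_1 for pt in pts_1]
--                 pts_2_shifted = [pt - pt_2 for pt in pts_2_oriented]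
--
--                 intersection = list((Counter(pts_1_shifted) & Counter(pts_2_shifted)).elements())
--                 if len(intersection) >= 12:
--                     return True
--
--     return False
-- ===== SOURCE B (Python) =====
-- from collections import Counter
--
-- def check_for_1d_overlap(pts_1, pts_2):
--     """Histogram of pairwise value differences: for each flip, one pass over
--     the two value-counters distributes min-multiplicity contributions into a
--     histogram keyed by offset d = v1 - v2, returning as soon as some offset
--     has accumulated an aligned overlap of at least 12."""
--     c1 = Counter(pts_1)
--     for flip in (1, -1):
--         c2 = Counter(pt * flip for pt in pts_2)
--         hist = {}
--         for v1, n1 in c1.items():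
--             for v2, n2 in c2.items():
--                 d = v1 - v2
--                 nd = hist.get(d, 0) + min(n1, n2)
--                 hist[d] = nd
--                 if nd >= 12:
--                     return True
--     return False
-- ===== Notes on version B (the rewrite author's own statement) =====
-- stated objective: alternative
-- what changed: A scans every anchor pair and, for each, rebuilds two shifted lists plus fresh Counters and intersects them; B never tests individual anchor pairs: in one pass over the two value-counters it distributes min(c1[v1],c2[v2]) into a histogram keyed by the difference v1-v2, returning as soon as some histogram cell reaches 12.
import Mathlib
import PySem

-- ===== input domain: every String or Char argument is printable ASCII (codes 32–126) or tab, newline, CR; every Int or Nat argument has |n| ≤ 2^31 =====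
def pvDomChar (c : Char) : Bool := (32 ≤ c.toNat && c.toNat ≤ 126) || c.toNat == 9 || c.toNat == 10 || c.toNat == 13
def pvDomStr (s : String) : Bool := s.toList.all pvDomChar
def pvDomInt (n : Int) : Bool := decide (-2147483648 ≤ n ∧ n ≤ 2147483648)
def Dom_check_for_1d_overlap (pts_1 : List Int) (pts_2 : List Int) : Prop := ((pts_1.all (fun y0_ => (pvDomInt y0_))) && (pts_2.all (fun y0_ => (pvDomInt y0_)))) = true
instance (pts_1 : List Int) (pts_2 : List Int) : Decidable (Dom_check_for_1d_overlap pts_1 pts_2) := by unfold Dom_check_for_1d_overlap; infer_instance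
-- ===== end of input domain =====

-- B replaces A's per-anchor-pair shifted-Counter intersection by a single histogram
-- of pairwise value differences accumulating min-multiplicities, with an early return
-- once a cell reaches 12 (an alternative algorithm; no speed claim is made).

-- ===== PORT A =====

-- Counter.__and__ (CPython): for each (elem, count) of self, newcount = min(count, other[elem]);
-- keep it iff newcount > 0.
def pvCounterAnd (c1 c2 : PySem.Dict Int Int) : PySem.Dict Int Int :=
  c1.items.foldl (fun r p =>
    let newcount := min p.2 (c2.getD p.1 0)
    if 0 < newcount then r.insert p.1 newcount else r) PySem.Dict.empty

-- len(list(c.elements())): every value stored by pvCounterAnd is positive, so the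
-- length of the expanded element list is the sum of the stored counts.
def pvElementsLen (c : PySem.Dict Int Int) : Int := c.values.sum

def check_for_1d_overlap (pts_1 : List Int) (pts_2 : List Int) : Bool :=
  -- for flip in [1, -1]: … return True early ⇔ List.any
  [1, -1].any (fun flip =>
    let pts_2_oriented := pts_2.map (fun pt => pt * flip)
    pts_1.any (fun pt_1 =>
      pts_2_oriented.any (fun pt_2 =>
        let pts_1_shifted := pts_1.map (fun pt => pt - pt_1)
        let pts_2_shifted := pts_2_oriented.map (fun pt => pt - pt_2)
        decide (12 ≤ pvElementsLen (pvCounterAnd (PySem.Dict.counter pts_1_shifted) (PySem.Dict.counter pts_2_shifted))))))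

-- ===== PORT B =====

-- one inner-loop step of B: bump the histogram cell for offset v1 - v2 and
-- return True as soon as that cell reaches 12 (st.1 = already returned)
def pvHistStep (st : Bool × PySem.Dict Int Int) (p : (Int × Int) × (Int × Int)) :
    Bool × PySem.Dict Int Int :=
  if st.1 then st
  else
    let d := p.1.1 - p.2.1
    let nd := st.2.getD d 0 + min p.1.2 p.2.2
    (decide (12 ≤ nd), st.2.insert d nd)

def check_for_1d_overlap_alt (pts_1 : List Int) (pts_2 : List Int) : Bool :=
  let c1 := PySem.Dict.counter pts_1
  [1, -1].any (fun flip =>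
    let c2 := PySem.Dict.counter (pts_2.map (fun pt => pt * flip))
    -- for v1, n1 in c1.items(): for v2, n2 in c2.items():
    --     nd = hist.get(d, 0) + min(n1, n2); hist[d] = nd; if nd >= 12: return True
    (c1.items.foldl (fun st p1 =>
      c2.items.foldl (fun st p2 => pvHistStep st (p1, p2)) st)
      (false, PySem.Dict.empty)).1)

-- ===== PRECONDITION & SPEC =====
def Spec_check_for_1d_overlap (pts_1 : List Int) (pts_2 : List Int) (out : Bool) : Prop := out = check_for_1d_overlap_alt pts_1 pts_2
instance (pts_1 : List Int) (pts_2 : List Int) (out : Bool) : Decidable (Spec_check_for_1d_overlap pts_1 pts_2 out) := by unfold Spec_check_for_1d_overlap; infer_instance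

-- ===== CLAIM (what is proved, stated in full; the proofs are below) =====
def Claim_equal_check_for_1d_overlap : Prop := ∀ (pts_1 : List Int) (pts_2 : List Int), Dom_check_for_1d_overlap pts_1 pts_2 → Spec_check_for_1d_overlap pts_1 pts_2 (check_for_1d_overlap pts_1 pts_2)

-- ===== LEMMAS AND PROOFS =====
lemma pv_foldl_add_map (f : Int → Int) (hf : Function.Injective f) :
    ∀ (xs : List Int) (s : List Int),
    (xs.map f).foldl PySem.Set.add (s.map f) = (xs.foldl PySem.Set.add s).map f := by
  intro xs
  induction xs with
  | nil => simp
  | cons x t ih =>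
      intro s
      simp only [List.map_cons, List.foldl_cons, PySem.Set.add, PySem.Set.contains,
        List.contains, List.elem_eq_mem, List.mem_map_of_injective hf]
      by_cases h : x ∈ s
      · simp only [h, decide_true, if_pos]
        exact ih s
      · simp only [h, decide_false, Bool.false_eq_true, if_neg, not_false_iff]
        rw [show (List.map f s ++ [f x]) = List.map f (s ++ [x]) by simp]
        exact ih (s ++ [x])

lemma pv_ofList_map (f : Int → Int) (hf : Function.Injective f) (xs : List Int) :
    PySem.Set.ofList (xs.map f) = (PySem.Set.ofList xs).map f := by
  simpa [PySem.Set.ofList, PySem.Set.empty] using pv_foldl_add_map f hf xs []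

lemma pv_counterAnd_fold (c2 : PySem.Dict Int Int) (ps : List (Int × Int)) (r : PySem.Dict Int Int)
    (hfresh : ∀ p ∈ ps, r.contains p.1 = false) (hnd : (ps.map (·.1)).Nodup) :
    (ps.foldl (fun r p =>
      let newcount := min p.2 (c2.getD p.1 0)
      if 0 < newcount then r.insert p.1 newcount else r) r).values.sum
    = r.values.sum + (ps.map (fun p =>
        let n := min p.2 (c2.getD p.1 0); if 0 < n then n else 0)).sum := by
  induction ps generalizing r with
  | nil => simp
  | cons p t ih =>
      simp only [List.map_cons, List.nodup_cons, List.mem_map] at hnd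
      obtain ⟨hp, hndt⟩ := hnd
      simp only [List.foldl_cons, List.map_cons, List.sum_cons]
      by_cases hn : 0 < min p.2 (c2.getD p.1 0)
      · simp only [hn, if_pos]
        rw [ih (r.insert p.1 (min p.2 (c2.getD p.1 0)))
          (by
            intro q hq
            rw [PySem.Dict.contains_insert]
            have h1 : q.1 ≠ p.1 := fun h => hp ⟨q, hq, h⟩
            simp [h1, hfresh q (List.mem_cons_of_mem _ hq)])
          hndt]
        have hv : (r.insert p.1 (min p.2 (c2.getD p.1 0))).values
            = r.values ++ [min p.2 (c2.getD p.1 0)] := by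
          simp only [PySem.Dict.values]
          rw [PySem.Dict.items_insert_of_not_contains r _ (hfresh p (List.mem_cons_self))]
          simp
        rw [hv]
        simp
        ring
      · simp only [hn, if_neg, not_false_iff]
        rw [ih r (fun q hq => hfresh q (List.mem_cons_of_mem _ hq)) hndt]
        simp at hn ⊢

lemma pv_elems_counterAnd (l1 l2 : List Int) :
    pvElementsLen (pvCounterAnd (PySem.Dict.counter l1) (PySem.Dict.counter l2))
    = ((PySem.List.dedup l1).map (fun v => min ((l1.count v : Int)) ((l2.count v : Int)))).sum := by
  unfold pvElementsLen pvCounterAnd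
  rw [pv_counterAnd_fold (PySem.Dict.counter l2) _ _
    (fun q _ => by simp [PySem.Dict.contains_empty])
    (by rw [PySem.Dict.items_counter]
        simp [List.map_map, Function.comp_def, PySem.Set.nodup_ofList l1])]
  rw [PySem.Dict.items_counter]
  simp only [PySem.Dict.values, PySem.Dict.empty, List.map_nil, List.sum_nil,
    zero_add, List.map_map]
  rw [PySem.List.dedup]
  apply congrArg
  apply List.map_congr_left
  intro k hk
  have hk1 : k ∈ l1 := (PySem.Set.mem_ofList l1 k).1 hk
  have h1 : (1 : Int) ≤ (l1.count k : Int) := by exact_mod_cast List.count_pos_iff.2 hk1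
  simp only [Function.comp, PySem.Dict.getD_counter]
  have hmin : 0 ≤ min ((l1.count k : Int)) ((l2.count k : Int)) := by
    have : (0:Int) ≤ (l2.count k : Int) := Int.natCast_nonneg _
    omega
  by_cases h : 0 < min ((l1.count k : Int)) ((l2.count k : Int))
  · simp [h]
  · simp only [h, if_neg, not_false_iff]
    omega

-- aligned overlap of the two multisets at offset d
def pvOvl (xs ys : List Int) (d : Int) : Int :=
  ((PySem.List.dedup xs).map (fun v => min ((xs.count v : Int)) ((ys.count (v - d) : Int)))).sum

lemma pv_a_inner (xs ys : List Int) (p q : Int) :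
    pvElementsLen (pvCounterAnd (PySem.Dict.counter (xs.map (fun pt => pt - p)))
      (PySem.Dict.counter (ys.map (fun pt => pt - q)))) = pvOvl xs ys (p - q) := by
  rw [pv_elems_counterAnd]
  unfold pvOvl
  rw [PySem.List.dedup, PySem.List.dedup, pv_ofList_map (fun pt => pt - p) (fun a b h => by simpa using h)]
  rw [List.map_map]
  apply congrArg
  apply List.map_congr_left
  intro v hv
  simp only [Function.comp]
  have h1 : (List.map (fun pt => pt - p) xs).count (v - p) = xs.count v :=
    List.count_map_of_injective xs (fun pt => pt - p) (fun a b h => by simpa using h) v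
  have h2 : (List.map (fun pt => pt - q) ys).count (v - p) = ys.count (v - p + q) := by
    have := List.count_map_of_injective ys (fun pt => pt - q) (fun a b h => by simpa using h) (v - p + q)
    simpa using this
  rw [h1, h2, show v - p + q = v - (p - q) by ring]

-- the histogram fold: getD at any offset d is the sum of the contributions keyed by d
lemma pv_hist_getD (L : List ((Int × Int) × (Int × Int))) (h : PySem.Dict Int Int) (d : Int) :
    (L.foldl (fun h p => h.insert (p.1.1 - p.2.1) (h.getD (p.1.1 - p.2.1) 0 + min p.1.2 p.2.2)) h).getD d 0
    = h.getD d 0 + (L.map (fun p => if p.1.1 - p.2.1 = d then min p.1.2 p.2.2 else 0)).sum := by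
  induction L generalizing h with
  | nil => simp
  | cons p t ih =>
      simp only [List.foldl_cons, List.map_cons, List.sum_cons]
      rw [ih, PySem.Dict.getD_insert]
      by_cases hk : d = p.1.1 - p.2.1
      · simp only [hk, if_true]
        ring
      · rw [if_neg hk, if_neg (fun h' => hk (Eq.symm h'))]
        ring

-- sum over a Nodup list of an indicator at one point
lemma pv_sum_ite_point (l : List Int) (hnd : l.Nodup) (t : Int) (f : Int → Int) :
    (l.map (fun b => if b = t then f b else 0)).sum = if t ∈ l then f t else 0 := by
  induction l with
  | nil => simp
  | cons a l ih =>
      simp only [List.nodup_cons] at hnd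
      simp only [List.map_cons, List.sum_cons, List.mem_cons, ih hnd.2]
      by_cases ha : a = t
      · subst ha
        simp [hnd.1]
      · have ht : ¬ t = a := fun h => ha (Eq.symm h)
        simp [ha, ht]

-- sum of a flatMap is the sum of the inner sums
lemma pv_sum_flatMap {α : Type} (l : List α) (f : α → List Int) :
    (l.flatMap f).sum = (l.map (fun a => (f a).sum)).sum := by
  induction l with
  | nil => simp
  | cons a t ih => simp [ih]

-- the full histogram sum at offset d is exactly the aligned overlap pvOvl
lemma pv_hist_sum (xs ys : List Int) (d : Int) :
    (((PySem.Dict.counter xs).items.flatMap (fun p1 =>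
        (PySem.Dict.counter ys).items.map (fun p2 => (p1, p2)))).map
      (fun p => if p.1.1 - p.2.1 = d then min p.1.2 p.2.2 else 0)).sum
    = pvOvl xs ys d := by
  rw [List.map_flatMap]
  rw [pv_sum_flatMap]
  unfold pvOvl
  rw [PySem.Dict.items_counter, PySem.Dict.items_counter, PySem.List.dedup]
  simp only [List.map_map, Function.comp_def]
  apply congrArg
  apply List.map_congr_left
  intro a ha
  have ha1 : a ∈ xs := (PySem.Set.mem_ofList xs a).1 ha
  have hinner :
      ((PySem.Set.ofList ys).map (fun b =>
        if a - b = d then min ((xs.count a : Int)) ((ys.count b : Int)) else 0)).sum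
      = if (a - d) ∈ PySem.Set.ofList ys then min ((xs.count a : Int)) ((ys.count (a - d) : Int)) else 0 := by
    have := pv_sum_ite_point (PySem.Set.ofList ys) (PySem.Set.nodup_ofList ys) (a - d)
      (fun b => min ((xs.count a : Int)) ((ys.count b : Int)))
    rw [← this]
    apply congrArg
    apply List.map_congr_left
    intro b _
    have : (a - b = d) ↔ (b = a - d) := by omega
    simp only [this]
  rw [show (fun x => if a - x = d then min ((xs.count a : Int)) ((ys.count x : Int)) else 0)
      = (fun b => if a - b = d then min ((xs.count a : Int)) ((ys.count b : Int)) else 0) from rfl] at *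
  rw [hinner]
  by_cases hm : (a - d) ∈ PySem.Set.ofList ys
  · rw [if_pos hm]
  · rw [if_neg hm]
    have : (a - d) ∉ ys := fun h => hm ((PySem.Set.mem_ofList ys (a - d)).2 h)
    rw [List.count_eq_zero_of_not_mem this]
    simp

-- nested fold over items = fold over the flattened pair list
lemma pv_nested_foldl {α β γ : Type} (l1 : List α) (l2 : List β) (g : γ → α → β → γ) (init : γ) :
    l1.foldl (fun h pa => l2.foldl (fun h pb => g h pa pb) h) init
    = (l1.flatMap (fun pa => l2.map (fun pb => (pa, pb)))).foldl (fun h p => g h p.1 p.2) init := by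
  induction l1 generalizing init with
  | nil => simp
  | cons a t ih => simp [List.foldl_append, List.foldl_map, ih]

-- once the early return has fired, the rest of the loop is a no-op
lemma pv_step_stuck (L : List ((Int × Int) × (Int × Int))) (h : PySem.Dict Int Int) :
    L.foldl pvHistStep (true, h) = (true, h) := by
  induction L with
  | nil => rfl
  | cons p t ih => simpa [pvHistStep] using ih

-- the early-exit accumulation fires iff the fully accumulated histogram has a cell ≥ 12
lemma pv_early_iff (L : List ((Int × Int) × (Int × Int)))
    (hc : ∀ p ∈ L, 0 ≤ min p.1.2 p.2.2) :
    ∀ h : PySem.Dict Int Int, (∀ d, h.getD d 0 < 12) →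
    ((L.foldl pvHistStep (false, h)).1 = true ↔
      ∃ d, 12 ≤ (L.foldl (fun h p => h.insert (p.1.1 - p.2.1) (h.getD (p.1.1 - p.2.1) 0 + min p.1.2 p.2.2)) h).getD d 0) := by
  induction L with
  | nil =>
      intro h hlt
      simp only [List.foldl_nil]
      constructor
      · intro hh; exact absurd hh (by simp)
      · rintro ⟨d, hd⟩; exact absurd hd (by have := hlt d; omega)
  | cons p t ih =>
      intro h hlt
      have hct : ∀ q ∈ t, 0 ≤ min q.1.2 q.2.2 := fun q hq => hc q (List.mem_cons_of_mem _ hq)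
      simp only [List.foldl_cons]
      set h' := h.insert (p.1.1 - p.2.1) (h.getD (p.1.1 - p.2.1) 0 + min p.1.2 p.2.2) with hh'
      by_cases hfire : 12 ≤ h'.getD (p.1.1 - p.2.1) 0
      · have hfire' : 12 ≤ h.getD (p.1.1 - p.2.1) 0 + min p.1.2 p.2.2 := by
          rw [hh', PySem.Dict.getD_insert_self] at hfire; exact hfire
        have hstep : pvHistStep (false, h) p = (true, h') := by
          simp [pvHistStep, hh']
          omega
        rw [hstep, pv_step_stuck]
        constructor
        · intro _
          refine ⟨p.1.1 - p.2.1, ?_⟩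
          rw [pv_hist_getD]
          have hS : 0 ≤ (t.map (fun q => if q.1.1 - q.2.1 = p.1.1 - p.2.1 then min q.1.2 q.2.2 else 0)).sum := by
            apply List.sum_nonneg
            intro x hx
            obtain ⟨q, hq, rfl⟩ := List.mem_map.1 hx
            by_cases hcase : q.1.1 - q.2.1 = p.1.1 - p.2.1
            · simpa [hcase] using hct q hq
            · simp [hcase]
          omega
        · intro _; rfl
      · have hfire' : ¬ 12 ≤ h.getD (p.1.1 - p.2.1) 0 + min p.1.2 p.2.2 := by
          rw [hh', PySem.Dict.getD_insert_self] at hfire; exact hfire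
        have hstep : pvHistStep (false, h) p = (false, h') := by
          simp [pvHistStep, hh']
          omega
        rw [hstep]
        apply ih hct
        intro d
        rw [hh', PySem.Dict.getD_insert]
        by_cases hd : d = p.1.1 - p.2.1
        · rw [if_pos hd]
          omega
        · rw [if_neg hd]
          exact hlt d

-- per-flip equivalence of the two programs
lemma pv_flip_eq (xs ys : List Int) :
    (xs.any (fun pt_1 => ys.any (fun pt_2 =>
      decide (12 ≤ pvElementsLen (pvCounterAnd (PySem.Dict.counter (xs.map (fun pt => pt - pt_1)))
        (PySem.Dict.counter (ys.map (fun pt => pt - pt_2))))))))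
    = ((PySem.Dict.counter xs).items.foldl (fun st p1 =>
        (PySem.Dict.counter ys).items.foldl (fun st p2 => pvHistStep st (p1, p2)) st)
        (false, PySem.Dict.empty)).1 := by
  set c1 := PySem.Dict.counter xs with hc1
  set c2 := PySem.Dict.counter ys with hc2
  set L := c1.items.flatMap (fun p1 => c2.items.map (fun p2 => (p1, p2))) with hL
  have hnest : (c1.items.foldl (fun st p1 =>
      c2.items.foldl (fun st p2 => pvHistStep st (p1, p2)) st) (false, PySem.Dict.empty))
      = L.foldl (fun st p => pvHistStep st (p.1, p.2)) (false, PySem.Dict.empty) :=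
    pv_nested_foldl c1.items c2.items (fun st p1 p2 => pvHistStep st (p1, p2)) (false, PySem.Dict.empty)
  have hc : ∀ p ∈ L, 0 ≤ min p.1.2 p.2.2 := by
    intro p hp
    rw [hL, List.mem_flatMap] at hp
    obtain ⟨p1, hp1, hp2m⟩ := hp
    obtain ⟨p2, hp2, rfl⟩ := List.mem_map.1 hp2m
    rw [hc1, PySem.Dict.items_counter] at hp1
    rw [hc2, PySem.Dict.items_counter] at hp2
    obtain ⟨a, _, rfl⟩ := List.mem_map.1 hp1
    obtain ⟨b, _, rfl⟩ := List.mem_map.1 hp2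
    have h1 : (0:Int) ≤ (xs.count a : Int) := Int.natCast_nonneg _
    have h2 : (0:Int) ≤ (ys.count b : Int) := Int.natCast_nonneg _
    simp only
    omega
  have heta : (L.foldl (fun st p => pvHistStep st (p.1, p.2)) (false, PySem.Dict.empty))
      = L.foldl pvHistStep (false, PySem.Dict.empty) := by rfl
  rw [hnest, heta, Bool.eq_iff_iff]
  rw [pv_early_iff L hc PySem.Dict.empty (by intro d; rw [PySem.Dict.getD_empty]; omega)]
  have hgetD : ∀ d, (L.foldl (fun h p => h.insert (p.1.1 - p.2.1) (h.getD (p.1.1 - p.2.1) 0 + min p.1.2 p.2.2))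
      PySem.Dict.empty).getD d 0 = pvOvl xs ys d := by
    intro d
    rw [pv_hist_getD, PySem.Dict.getD_empty, zero_add, hL, hc1, hc2, pv_hist_sum]
  simp only [List.any_eq_true, decide_eq_true_eq, hgetD]
  constructor
  · rintro ⟨a, ha, b, hb, h12⟩
    rw [pv_a_inner] at h12
    exact ⟨a - b, h12⟩
  · rintro ⟨d, h12⟩
    -- pvOvl ≥ 12 > 0 forces a witness value a ∈ xs with a - d ∈ ys
    have hpos : ∃ a ∈ PySem.List.dedup xs,
        0 < min ((xs.count a : Int)) ((ys.count (a - d) : Int)) := by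
      by_contra hno
      push Not at hno
      have hle : pvOvl xs ys d ≤ 0 := by
        unfold pvOvl
        have := List.sum_le_sum (l := (PySem.List.dedup xs).map
            (fun v => min ((xs.count v : Int)) ((ys.count (v - d) : Int))))
          (f := id) (g := fun _ => (0:Int)) ?_
        · simpa [Function.comp_def] using this
        · intro x hx
          obtain ⟨a, ha, rfl⟩ := List.mem_map.1 hx
          simpa using hno a ha
      omega
    obtain ⟨a, ha, hmin⟩ := hpos
    have ha1 : a ∈ xs := by
      rw [PySem.List.dedup, PySem.Set.mem_ofList] at ha; exact ha
    have hb1 : (a - d) ∈ ys := by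
      have : (0:Int) < (ys.count (a - d) : Int) := by omega
      exact_mod_cast List.count_pos_iff.1 (by exact_mod_cast this)
    refine ⟨a, ha1, a - d, hb1, ?_⟩
    rw [pv_a_inner, show a - (a - d) = d by ring]
    exact h12

-- ===== VERDICT (by name: the statement is the Claim_ definition above) =====
theorem check_for_1d_overlap_spec : Claim_equal_check_for_1d_overlap := by
  intro pts_1 pts_2 _
  unfold Spec_check_for_1d_overlap check_for_1d_overlap check_for_1d_overlap_alt
  simp only []
  congr 1
  funext flip
  exact pv_flip_eq pts_1 (pts_2.map (fun pt => pt * flip))
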